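-- pv_equiv track=rewrite | github.com/cervantes79/contrachecker | tests/growth_test.py | _has_chain_through
-- ===== SOURCE A (Python) =====
-- def _get_all_text(conclusions):
--     """Tum sonuclardan metinleri topla."""
--     if not conclusions:
--         return ""
--     texts = []
--     for c in conclusions:
--         if c["type"] == "direct":
--             texts.append(str(c["rule"]))
--         elif c["type"] == "chained":
--             texts.append(c.get("chain", ""))
--     return " ".join(texts).lower()
--
-- def _has_chain_through(conclusions, nodes):
--     """Sonuclarda belirli nodelarin hepsini iceren bir zincir var mi?"""
--     if not conclusions:
--         return False
--     for c in conclusions: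
--         if c["type"] == "chained":
--             chain = c.get("chain", "").lower()
--             if all(n in chain for n in nodes):
--                 return True
--     # Also check if the full path exists across multiple chains
--     all_text = _get_all_text(conclusions)
--     return all(n in all_text for n in nodes)
-- ===== SOURCE B (Python) =====
-- def _has_chain_through(conclusions, nodes):
--     """Sonuclarda belirli nodelarin hepsini iceren bir zincir var mi?"""
--     if not conclusions:
--         return False
--     pieces = []
--     for c in conclusions:
--         # streaming: stop as soon as the text collected so far covers every node
--         if all(n in " ".join(pieces).lower() for n in nodes):
--             return True
--         t = c["type"]
--         if t == "direct":
--             pieces.append(str(c.get("rule", "")))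
--         elif t == "chained":
--             pieces.append(c.get("chain", ""))
--     return all(n in " ".join(pieces).lower() for n in nodes)
-- ===== Notes on version B (the rewrite author's own statement) =====
-- stated objective: alternative
-- what changed: B replaces A's two-phase scan (per-chain early-return loop, then a separately rebuilt combined text) by one streaming pass that accumulates the text pieces and checks the cumulative combined text, stopping as soon as it covers every node; A's per-chain hit is subsumed because each chain is a contiguous substring of the joined lowered text.
import Mathlib
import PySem

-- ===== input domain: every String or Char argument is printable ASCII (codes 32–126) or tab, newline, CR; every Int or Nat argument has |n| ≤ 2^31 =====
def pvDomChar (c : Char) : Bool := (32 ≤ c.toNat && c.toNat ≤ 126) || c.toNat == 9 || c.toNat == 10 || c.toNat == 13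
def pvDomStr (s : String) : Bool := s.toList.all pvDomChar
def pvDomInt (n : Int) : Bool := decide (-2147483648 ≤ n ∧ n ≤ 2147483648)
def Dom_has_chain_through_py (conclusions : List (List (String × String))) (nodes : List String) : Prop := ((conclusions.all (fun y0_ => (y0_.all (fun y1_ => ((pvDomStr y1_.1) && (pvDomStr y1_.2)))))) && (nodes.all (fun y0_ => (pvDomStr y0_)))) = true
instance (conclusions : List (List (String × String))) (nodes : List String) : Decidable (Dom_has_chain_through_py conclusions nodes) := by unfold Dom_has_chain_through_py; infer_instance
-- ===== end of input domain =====

-- B replaces A's two-phase scan (per-chain early-return loop + separately rebuilt combined text)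
-- by one streaming pass over the cumulative combined text, early-exiting once every node is seen.


-- dict lookup, first match (Python dict keys are unique; assoc-list convention)
def pvGet? (c : List (String × String)) (k : String) : Option String :=
  (c.find? (fun p => p.1 == k)).map (·.2)

-- ===== PORT A =====
-- c["type"] / c["rule"] raise KeyError where the key is missing; those inputs are outside
-- Pre_has_chain_through_py, so the '.getD ""' completion is never reached on admitted inputs.
def pvGetAllText (conclusions : List (List (String × String))) : String :=
  if conclusions.isEmpty then "" else
    PySem.Str.lower (PySem.Str.join " " (conclusions.foldl (fun ts c =>
      if ((pvGet? c "type").getD "") == "direct" then ts ++ [(pvGet? c "rule").getD ""]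
      else if ((pvGet? c "type").getD "") == "chained" then ts ++ [(pvGet? c "chain").getD ""]
      else ts) []))

def pvLoopA (conclusions : List (List (String × String))) (nodes : List String) :
    List (List (String × String)) → Bool
  | [] => nodes.all (fun n => PySem.Str.isIn n (pvGetAllText conclusions))
  | c :: rest =>
    if ((pvGet? c "type").getD "") == "chained" then
      let chain := PySem.Str.lower ((pvGet? c "chain").getD "")
      if nodes.all (fun n => PySem.Str.isIn n chain) then true
      else pvLoopA conclusions nodes rest
    else pvLoopA conclusions nodes rest

def has_chain_through_py (conclusions : List (List (String × String))) (nodes : List String) : Bool :=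
  if conclusions.isEmpty then false else pvLoopA conclusions nodes conclusions

-- ===== PORT B =====
-- 'all(n in " ".join(pieces).lower() for n in nodes)' of Source B
def pvCheck (pieces : List String) (nodes : List String) : Bool :=
  nodes.all (fun n => PySem.Str.isIn n (PySem.Str.lower (PySem.Str.join " " pieces)))

-- Source B's single loop: accumulate pieces, early exit once the cumulative text covers all nodes;
-- c["type"] raises KeyError where missing — outside Pre_, the '.getD ""' completion is unreached.
def pvLoopB (nodes : List String) (pieces : List String) :
    List (List (String × String)) → Bool
  | [] => pvCheck pieces nodes
  | c :: rest =>
    if pvCheck pieces nodes then true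
    else
      if ((pvGet? c "type").getD "") == "direct" then
        pvLoopB nodes (pieces ++ [(pvGet? c "rule").getD ""]) rest
      else if ((pvGet? c "type").getD "") == "chained" then
        pvLoopB nodes (pieces ++ [(pvGet? c "chain").getD ""]) rest
      else pvLoopB nodes pieces rest

def has_chain_through_py_alt (conclusions : List (List (String × String))) (nodes : List String) : Bool :=
  if conclusions.isEmpty then false else pvLoopB nodes [] conclusions

-- ===== PRECONDITION & SPEC =====
-- a dict carries a "type" field
def pvHasType (c : List (String × String)) : Bool := (pvGet? c "type").isSome
-- a well-formed dict: has "type", and a "direct" one also has "rule"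
def pvWF (c : List (String × String)) : Bool :=
  pvHasType c && (!(pvGet? c "type" == some "direct") || (pvGet? c "rule").isSome)
-- a "chained" dict whose lowered chain already contains every node
def pvChainHit (nodes : List String) (c : List (String × String)) : Bool :=
  (pvGet? c "type" == some "chained")
    && nodes.all (fun n => PySem.Str.isIn n (PySem.Str.lower ((pvGet? c "chain").getD "")))
-- Pre_ is exactly the set of inputs on which Python A returns (everywhere else A raises
-- KeyError): either every dict is well-formed, or a full-match chain occurs before the first
-- dict missing "type" (A's early return fires before any KeyError is reached).
def Pre_has_chain_through_py (conclusions : List (List (String × String))) (nodes : List String) : Prop :=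
  conclusions.all pvWF = true ∨
    (conclusions.takeWhile pvHasType).any (pvChainHit nodes) = true
instance (conclusions : List (List (String × String))) (nodes : List String) : Decidable (Pre_has_chain_through_py conclusions nodes) := by unfold Pre_has_chain_through_py; infer_instance

def pvWitness_has_chain_through_py : (List (List (String × String))) × List String :=
  ([[("type", "chained"), ("chain", "A b")], [("type", "direct"), ("rule", "c")]], ["a", "c"])

def Spec_has_chain_through_py (conclusions : List (List (String × String))) (nodes : List String) (out : Bool) : Prop := out = has_chain_through_py_alt conclusions nodes
instance (conclusions : List (List (String × String))) (nodes : List String) (out : Bool) : Decidable (Spec_has_chain_through_py conclusions nodes out) := by unfold Spec_has_chain_through_py; infer_instance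

-- ===== CLAIM (what is proved, stated in full; the proofs are below) =====
def Claim_equal_has_chain_through_py : Prop := ∀ (conclusions : List (List (String × String))) (nodes : List String), Dom_has_chain_through_py conclusions nodes → Pre_has_chain_through_py conclusions nodes → Spec_has_chain_through_py conclusions nodes (has_chain_through_py conclusions nodes)

-- ===== LEMMAS AND PROOFS =====

-- proof-only helpers: the pieces A's _get_all_text keeps, and the text it produces
def pvKept (c : List (String × String)) : Bool :=
  ((pvGet? c "type").getD "") == "direct" || ((pvGet? c "type").getD "") == "chained"

def pvTextOf (c : List (String × String)) : String :=
  if ((pvGet? c "type").getD "") == "direct" then (pvGet? c "rule").getD ""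
  else (pvGet? c "chain").getD ""

def pvAllTextB (conclusions : List (List (String × String))) : String :=
  PySem.Str.lower (PySem.Str.join " " ((conclusions.filter pvKept).map pvTextOf))

-- A's fold over conclusions builds exactly the filter-and-map list of texts.
theorem pvTexts_eq (l : List (List (String × String))) (acc : List String) :
    l.foldl (fun ts c =>
      if ((pvGet? c "type").getD "") == "direct" then ts ++ [(pvGet? c "rule").getD ""]
      else if ((pvGet? c "type").getD "") == "chained" then ts ++ [(pvGet? c "chain").getD ""]
      else ts) acc = acc ++ (l.filter pvKept).map pvTextOf := by
  induction l generalizing acc with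
  | nil => simp
  | cons c rest ih =>
    simp only [List.foldl_cons, List.filter_cons]
    by_cases h1 : ((pvGet? c "type").getD "" == "direct") = true
    · rw [if_pos h1, ih]
      have hk : pvKept c = true := by simp [pvKept, h1]
      have htx : pvTextOf c = (pvGet? c "rule").getD "" := by simp [pvTextOf, h1]
      rw [hk, if_pos rfl, List.map_cons, htx]
      simp
    · by_cases h2 : ((pvGet? c "type").getD "" == "chained") = true
      · rw [if_neg h1, if_pos h2, ih]
        have hk : pvKept c = true := by simp [pvKept, h2]
        have htx : pvTextOf c = (pvGet? c "chain").getD "" := by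
          simp only [pvTextOf]
          rw [if_neg h1]
        rw [hk, if_pos rfl, List.map_cons, htx]
        simp
      · rw [if_neg h1, if_neg h2, ih]
        have hk : pvKept c = false := by
          unfold pvKept
          rw [Bool.or_eq_false_iff]
          exact ⟨by simpa using h1, by simpa using h2⟩
        rw [hk]
        simp

theorem pvAllText_eq (conclusions : List (List (String × String))) (h : conclusions.isEmpty = false) :
    pvGetAllText conclusions = pvAllTextB conclusions := by
  unfold pvGetAllText pvAllTextB
  rw [if_neg (by simp [h]), pvTexts_eq, List.nil_append]

-- every joined part is a contiguous piece of the join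
theorem pvMem_join_infix (x : String) (parts : List String) (hx : x ∈ parts) :
    x.toList <:+: (PySem.Str.join " " parts).toList := by
  rw [PySem.Str.toList_join]
  induction parts with
  | nil => cases hx
  | cons p rest ih =>
    cases rest with
    | nil =>
      rcases List.mem_singleton.mp hx with rfl
      simp only [List.map_cons, List.map_nil]
      rw [PySem.Chars.join_singleton]
    | cons q rest' =>
      simp only [List.map_cons] at ih ⊢
      rw [PySem.Chars.join_cons_cons]
      rcases List.mem_cons.mp hx with rfl | hx'
      · exact ((List.prefix_append _ _).trans (List.prefix_append _ _)).isInfix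
      · exact (ih hx').trans (List.suffix_append _ _).isInfix

theorem pvLower_infix {x s : String} (h : x.toList <:+: s.toList) :
    (PySem.Str.lower x).toList <:+: (PySem.Str.lower s).toList := by
  rw [PySem.Str.toList_lower, PySem.Str.toList_lower]
  exact h.map PySem.Chars.lowerChar

-- a "chained" conclusion's lowered chain is a contiguous piece of the lowered combined text
theorem pvChain_infix (conclusions : List (List (String × String)))
    (c : List (String × String)) (hc : c ∈ conclusions)
    (ht : (((pvGet? c "type").getD "") == "chained") = true) :
    (PySem.Str.lower ((pvGet? c "chain").getD "")).toList <:+: (pvGetAllText conclusions).toList := by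
  have hne : conclusions.isEmpty = false := by
    cases conclusions with
    | nil => cases hc
    | cons _ _ => rfl
  rw [pvAllText_eq conclusions hne]
  have hkept : pvKept c = true := by simp [pvKept, ht]
  have hdir : (((pvGet? c "type").getD "") == "direct") = false := by
    rcases eq_of_beq ht with h
    simp [h]
  have hmem : pvTextOf c ∈ (conclusions.filter pvKept).map pvTextOf :=
    List.mem_map_of_mem (List.mem_filter.mpr ⟨hc, hkept⟩)
  have := pvMem_join_infix _ _ hmem
  have htext : pvTextOf c = (pvGet? c "chain").getD "" := by simp [pvTextOf, hdir]
  rw [htext] at this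
  exact pvLower_infix this

-- A's loop = the full-combined-text check, whatever suffix it still has to walk
theorem pvLoopA_eq (conclusions : List (List (String × String))) (nodes : List String)
    (l : List (List (String × String))) (hl : ∀ c ∈ l, c ∈ conclusions) :
    pvLoopA conclusions nodes l =
      nodes.all (fun n => PySem.Str.isIn n (pvGetAllText conclusions)) := by
  induction l with
  | nil => rfl
  | cons c rest ih =>
    have hc : c ∈ conclusions := hl c (List.mem_cons_self ..)
    have hrest : ∀ d ∈ rest, d ∈ conclusions := fun d hd => hl d (List.mem_cons_of_mem _ hd)
    rw [pvLoopA]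
    by_cases ht : (((pvGet? c "type").getD "") == "chained") = true
    · simp only [ht, if_true]
      by_cases hall : nodes.all
          (fun n => PySem.Str.isIn n (PySem.Str.lower ((pvGet? c "chain").getD ""))) = true
      · simp only [hall, if_true]
        have hchain := pvChain_infix conclusions c hc ht
        symm
        rw [List.all_eq_true] at hall ⊢
        intro n hn
        have h1 := (PySem.Str.isIn_iff_infix _ _).mp (hall n hn)
        exact (PySem.Str.isIn_iff_infix _ _).mpr (h1.trans hchain)
      · simp only [hall]
        simp only [Bool.false_eq_true, if_false]
        exact ih hrest
    · simp only [ht]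
      simp only [Bool.false_eq_true, if_false]
      exact ih hrest

-- the join of a list of pieces is a prefix of the join of any extension
theorem pvJoin_prefix (xs ys : List (List Char)) (sep : List Char) :
    PySem.Chars.join sep xs <+: PySem.Chars.join sep (xs ++ ys) := by
  induction xs with
  | nil => exact List.nil_prefix
  | cons a as ih =>
    cases as with
    | nil =>
      cases ys with
      | nil => exact List.prefix_refl _
      | cons b bs =>
        rw [PySem.Chars.join_singleton, List.singleton_append, PySem.Chars.join_cons_cons]
        exact (List.prefix_append _ _).trans (List.prefix_append _ _)
    | cons a2 as' =>
      rw [PySem.Chars.join_cons_cons, List.cons_append, List.cons_append, PySem.Chars.join_cons_cons]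
      rcases ih with ⟨t, ht⟩
      exact ⟨t, by rw [List.append_assoc (a ++ sep), ht, List.cons_append]⟩

-- the cumulative check is monotone: once true on a prefix of the pieces, true on all of them
theorem pvCheck_mono (pieces more : List String) (nodes : List String)
    (h : pvCheck pieces nodes = true) : pvCheck (pieces ++ more) nodes = true := by
  unfold pvCheck at h ⊢
  rw [List.all_eq_true] at h ⊢
  intro n hn
  have h1 := (PySem.Str.isIn_iff_infix _ _).mp (h n hn)
  apply (PySem.Str.isIn_iff_infix _ _).mpr
  apply h1.trans
  apply pvLower_infix
  rw [PySem.Str.toList_join, PySem.Str.toList_join, List.map_append]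
  exact (pvJoin_prefix _ _ _).isInfix

-- B's loop = the check over the accumulated pieces plus all pieces still to come
theorem pvLoopB_eq (nodes : List String) (l : List (List (String × String)))
    (pieces : List String) :
    pvLoopB nodes pieces l = pvCheck (pieces ++ (l.filter pvKept).map pvTextOf) nodes := by
  induction l generalizing pieces with
  | nil => simp [pvLoopB]
  | cons c rest ih =>
    rw [pvLoopB]
    by_cases hchk : pvCheck pieces nodes = true
    · rw [if_pos hchk]
      exact (pvCheck_mono _ _ _ hchk).symm
    · rw [if_neg hchk]
      simp only [List.filter_cons]
      by_cases h1 : ((pvGet? c "type").getD "" == "direct") = true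
      · have hk : pvKept c = true := by simp [pvKept, h1]
        have htx : pvTextOf c = (pvGet? c "rule").getD "" := by simp [pvTextOf, h1]
        rw [if_pos h1, ih, hk, if_pos rfl, List.map_cons, htx]
        simp
      · by_cases h2 : ((pvGet? c "type").getD "" == "chained") = true
        · have hk : pvKept c = true := by simp [pvKept, h2]
          have htx : pvTextOf c = (pvGet? c "chain").getD "" := by
            simp only [pvTextOf]
            rw [if_neg h1]
          rw [if_neg h1, if_pos h2, ih, hk, if_pos rfl, List.map_cons, htx]
          simp
        · have hk : pvKept c = false := by
            unfold pvKept
            rw [Bool.or_eq_false_iff]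
            exact ⟨by simpa using h1, by simpa using h2⟩
          rw [if_neg h1, if_neg h2, ih, hk]
          simp

-- ===== VERDICT (by name: the statement is the Claim_ definition above) =====
theorem has_chain_through_py_spec : Claim_equal_has_chain_through_py := by
  intro conclusions nodes _ _
  unfold Spec_has_chain_through_py has_chain_through_py has_chain_through_py_alt
  by_cases h : conclusions.isEmpty
  · simp [h]
  · have h' : conclusions.isEmpty = false := by simpa using h
    simp only [h', Bool.false_eq_true, if_false]
    rw [pvLoopA_eq conclusions nodes conclusions (fun c hc => hc),
      pvAllText_eq conclusions h', pvLoopB_eq, List.nil_append]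
    rfl
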